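-- pv_equiv track=rewrite | github.com/med13foundation/artana-evidence-platform | services/artana_evidence_api/tests/unit/test_v2_public_routes.py | _concrete_v2_path
-- ===== SOURCE A (Python) =====
-- _UUID = "11111111-1111-1111-1111-111111111111"
--
-- def _concrete_v2_path(path: str) -> str:
--     replacements = {
--         "{space_id}": _UUID,
--         "{task_id}": _UUID,
--         "{document_id}": _UUID,
--         "{session_id}": _UUID,
--         "{job_id}": _UUID,
--         "{result_id}": _UUID,
--         "{proposal_id}": _UUID,
--         "{schedule_id}": _UUID,
--         "{user_id}": _UUID,
--         "{key_id}": _UUID,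
--         "{approval_key}": "approval-1",
--         "{artifact_key}": "run_manifest",
--         "{output_key}": "run_manifest",
--         "{candidate_index}": "0",
--         "{item_id}": "proposal:11111111-1111-1111-1111-111111111111",
--         "{template_id}": "research-bootstrap",
--         "{source_key}": "pubmed",
--         "{search_id}": _UUID,
--         "{evidence_run_id}": _UUID,
--     }
--     concrete = path
--     for parameter, value in replacements.items():
--         concrete = concrete.replace(parameter, value)
--     return concrete
-- ===== SOURCE B (Python) =====
-- _UUID = "11111111-1111-1111-1111-111111111111"
--
-- # placeholder names that all map to the test UUID
-- _ID_FIELDS = (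
--     "space_id task_id document_id session_id job_id result_id proposal_id "
--     "schedule_id user_id key_id search_id evidence_run_id"
-- )
--
-- # the remaining placeholders with their literal test values
-- _LITERALS = {
--     "approval_key": "approval-1",
--     "artifact_key": "run_manifest",
--     "output_key": "run_manifest",
--     "candidate_index": "0",
--     "item_id": "proposal:" + _UUID,
--     "template_id": "research-bootstrap",
--     "source_key": "pubmed",
-- }
--
--
-- def _concrete_v2_path(path: str) -> str:
--     repl = {name: _UUID for name in _ID_FIELDS.split()}
--     repl.update(_LITERALS)
--     out = []
--     i = 0
--     n = len(path)
--     while i < n: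
--         ch = path[i]
--         if ch == "{":
--             j = path.find("}", i + 1)
--             if j != -1 and path[i + 1 : j] in repl:
--                 out.append(repl[path[i + 1 : j]])
--                 i = j + 1
--                 continue
--         out.append(ch)
--         i += 1
--     return "".join(out)
-- ===== Notes on version B (the rewrite author's own statement) =====
-- stated objective: alternative
-- what changed: A rewrites the whole path 19 times, once per placeholder, via cascaded str.replace passes; B builds one dict keyed by the brace-free placeholder name and makes a single left-to-right scan that, at each opening brace, slices out the name up to the next closing brace and substitutes it with one dict lookup.
import Mathlib
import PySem

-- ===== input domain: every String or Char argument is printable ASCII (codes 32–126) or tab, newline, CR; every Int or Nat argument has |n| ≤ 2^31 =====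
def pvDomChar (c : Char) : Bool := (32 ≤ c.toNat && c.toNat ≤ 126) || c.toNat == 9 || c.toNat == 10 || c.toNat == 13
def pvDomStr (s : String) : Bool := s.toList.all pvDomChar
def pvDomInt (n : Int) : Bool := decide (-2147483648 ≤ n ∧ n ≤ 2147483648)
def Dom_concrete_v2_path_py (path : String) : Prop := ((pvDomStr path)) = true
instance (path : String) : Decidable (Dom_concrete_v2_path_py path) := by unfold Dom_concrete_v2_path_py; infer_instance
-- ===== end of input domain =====

set_option maxRecDepth 4000


-- B replaces A's 19 full-string `.replace` passes with a single left-to-right scan over a dict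
-- keyed by the brace-free placeholder name (objective: alternative single-pass algorithm, same result).

-- ===== PORT A =====
-- the UUID constant of the module
def pvUUID : String := "11111111-1111-1111-1111-111111111111"

-- A's dict literal: 19 distinct keys, so dict.items() is exactly this list in insertion order
def pvPairsA : List (String × String) :=
  [("{space_id}", pvUUID), ("{task_id}", pvUUID), ("{document_id}", pvUUID),
   ("{session_id}", pvUUID), ("{job_id}", pvUUID), ("{result_id}", pvUUID),
   ("{proposal_id}", pvUUID), ("{schedule_id}", pvUUID), ("{user_id}", pvUUID),
   ("{key_id}", pvUUID), ("{approval_key}", "approval-1"), ("{artifact_key}", "run_manifest"),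
   ("{output_key}", "run_manifest"), ("{candidate_index}", "0"),
   ("{item_id}", "proposal:11111111-1111-1111-1111-111111111111"),
   ("{template_id}", "research-bootstrap"), ("{source_key}", "pubmed"),
   ("{search_id}", pvUUID), ("{evidence_run_id}", pvUUID)]

-- A: `concrete = path; for parameter, value in replacements.items(): concrete = concrete.replace(parameter, value)`
def concrete_v2_path_py (path : String) : String :=
  pvPairsA.foldl (fun concrete kv => PySem.Str.replace concrete kv.1 kv.2) path

-- ===== PORT B =====
-- B's module constants: the UUID, the whitespace-separated UUID-valued names, the literal-valued names
def pvAltUUID : List Char := "11111111-1111-1111-1111-111111111111".toList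

def pvIdFields : String :=
  "space_id task_id document_id session_id job_id result_id proposal_id schedule_id user_id key_id search_id evidence_run_id"

def pvAltLits : List (List Char × List Char) :=
  [("approval_key".toList, "approval-1".toList),
   ("artifact_key".toList, "run_manifest".toList),
   ("output_key".toList, "run_manifest".toList),
   ("candidate_index".toList, "0".toList),
   ("item_id".toList, "proposal:".toList ++ pvAltUUID),
   ("template_id".toList, "research-bootstrap".toList),
   ("source_key".toList, "pubmed".toList)]

-- `repl = {name: _UUID for name in _ID_FIELDS.split()}; repl.update(_LITERALS)`:
-- a comprehension over the split names, then the literal entries; all 19 keys are distinct,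
-- so the dict's items in insertion order are exactly this append
def pvAltTable : List (List Char × List Char) :=
  (PySem.Str.split₀ pvIdFields).map (fun n => (n.toList, pvAltUUID)) ++ pvAltLits

-- `j = path.find("}", i + 1)`: split the remainder at the first '}' (none = not found)
def pvSplitBrace : List Char → Option (List Char × List Char)
  | [] => none
  | c :: t =>
    if c = '}' then some ([], t)
    else match pvSplitBrace t with
         | none => none
         | some (w, r) => some (c :: w, r)

-- `path[i+1:j] in repl` / `repl[path[i+1:j]]`: first-match association-list lookup
def pvLookup : List (List Char × List Char) → List Char → Option (List Char)
  | [], _ => none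
  | (k, v) :: rest, tok => if tok = k then some v else pvLookup rest tok

theorem pvSplitBrace_some {t w r : List Char} (h : pvSplitBrace t = some (w, r)) :
    t = w ++ '}' :: r ∧ '}' ∉ w := by
  induction t generalizing w with
  | nil => simp [pvSplitBrace] at h
  | cons c t ih =>
    by_cases hc : c = '}'
    · simp [pvSplitBrace, hc] at h
      simp [hc, h.1, ← h.2]
    · simp only [pvSplitBrace, if_neg hc] at h
      cases hs : pvSplitBrace t with
      | none => rw [hs] at h; simp at h
      | some p =>
        obtain ⟨w', r'⟩ := p
        rw [hs] at h
        simp at h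
        obtain ⟨hw, hr⟩ := h
        subst hr
        obtain ⟨he, hm⟩ := ih hs
        subst hw
        refine ⟨by simp [he], ?_⟩
        simp [hm]
        exact fun hcc => hc hcc.symm

-- B's while-loop: copy chars; at '{' take the name up to the next '}' and look it up by name
def pvScan : List Char → List Char
  | [] => []
  | c :: t =>
    if c = '{' then
      match h : pvSplitBrace t with
      | some (w, r) =>
        match pvLookup pvAltTable w with
        | some v => v ++ pvScan r
        | none => c :: pvScan t
      | none => c :: pvScan t
    else c :: pvScan t
termination_by l => l.length
decreasing_by
  · have := (pvSplitBrace_some h).1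
    subst this
    simp
    omega
  all_goals simp

def concrete_v2_path_py_alt (path : String) : String :=
  String.ofList (pvScan path.toList)

-- ===== PRECONDITION & SPEC =====
def Spec_concrete_v2_path_py (path : String) (out : String) : Prop := out = concrete_v2_path_py_alt path
instance (path : String) (out : String) : Decidable (Spec_concrete_v2_path_py path out) := by unfold Spec_concrete_v2_path_py; infer_instance

-- ===== CLAIM (what is proved, stated in full; the proofs are below) =====
def Claim_equal_concrete_v2_path_py : Prop := ∀ (path : String), Dom_concrete_v2_path_py path → Spec_concrete_v2_path_py path (concrete_v2_path_py path)

-- ===== LEMMAS AND PROOFS =====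

-- A's table at the character-list level (proof-side mirror of pvPairsA)
def pvPairsB : List (List Char × List Char) :=
  pvPairsA.map (fun kv => (kv.1.toList, kv.2.toList))

-- Python str.replace (old ≠ ''), as a plain recursion without fuel/accumulator
def pvRep (o n : List Char) : List Char → List Char
  | [] => []
  | c :: t =>
    if o.isPrefixOf (c :: t) then n ++ pvRep o n (t.drop (o.length - 1))
    else c :: pvRep o n t
termination_by l => l.length
decreasing_by
  all_goals simp

theorem pvRep_nil (o n : List Char) : pvRep o n [] = [] := by rw [pvRep]

theorem pvRep_pos (o n : List Char) {c : Char} {t : List Char} (h : o <+: c :: t) :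
    pvRep o n (c :: t) = n ++ pvRep o n (t.drop (o.length - 1)) := by
  rw [pvRep, if_pos (List.isPrefixOf_iff_prefix.mpr h)]

theorem pvRep_neg (o n : List Char) {c : Char} {t : List Char} (h : ¬ o <+: c :: t) :
    pvRep o n (c :: t) = c :: pvRep o n t := by
  rw [pvRep, if_neg]
  simp [List.isPrefixOf_iff_prefix]
  exact h

theorem pvGo_eq (o n : List Char) (ho : o ≠ []) :
    ∀ fuel l acc, l.length ≤ fuel →
      PySem.Chars.replace.go o n fuel l acc = acc.reverse ++ pvRep o n l := by
  intro fuel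
  induction fuel with
  | zero =>
    intro l acc hl
    have : l = [] := by cases l <;> simp_all
    subst this
    rw [PySem.Chars.replace.go.eq_def]
    simp [pvRep_nil]
  | succ fuel ih =>
    intro l acc hl
    cases l with
    | nil => rw [PySem.Chars.replace.go.eq_def]; simp [pvRep_nil]
    | cons c t =>
      rw [PySem.Chars.replace.go.eq_def]
      simp only []
      by_cases hp : o.isPrefixOf (c :: t)
      · rw [if_pos hp]
        have hpre : o <+: c :: t := List.isPrefixOf_iff_prefix.mp hp
        have holen : 1 ≤ o.length := by cases o <;> simp_all
        have hdrop : (c :: t).drop o.length = t.drop (o.length - 1) := by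
          cases o with
          | nil => simp_all
          | cons a o' => simp
        rw [ih _ _ (by simp at hl ⊢; omega), pvRep_pos o n hpre, hdrop]
        simp
      · rw [if_neg hp]
        rw [ih _ _ (by simp at hl ⊢; omega)]
        rw [pvRep_neg o n (fun hh => hp (List.isPrefixOf_iff_prefix.mpr hh))]
        simp

theorem pvReplace_eq_rep {o : List Char} (n : List Char) (ho : o ≠ []) (s : List Char) :
    PySem.Chars.replace s o n = pvRep o n s := by
  unfold PySem.Chars.replace
  rw [if_neg (by simp [ho]), pvGo_eq o n ho s.length s [] le_rfl]
  simp

-- shape of a placeholder key: '{', a brace-free body, '}'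
def pvBody (k : List Char) : List Char := (k.drop 1).dropLast

abbrev pvGood (k : List Char) : Prop :=
  k = '{' :: (pvBody k ++ ['}']) ∧ '{' ∉ pvBody k ∧ '}' ∉ pvBody k

-- concrete side conditions of the replacement table, checked by computation
theorem pvSide1 : ∀ kv ∈ pvPairsB, pvGood kv.1 := by decide
theorem pvSide2 : (pvPairsB.map Prod.fst).Nodup := by decide
theorem pvSide3 : ∀ kv ∈ pvPairsB, '{' ∉ kv.2 ∧ '}' ∉ kv.2 := by decide
theorem pvSide4 : ∀ kv ∈ pvPairsB, ∀ kv' ∈ pvPairsB, ¬ kv.2 <:+: pvBody kv'.1 := by decide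

-- B's name-keyed table and A's brace-keyed table describe the same mapping (checked by computation)
theorem pvBridge1 : ∀ kv ∈ pvAltTable, ('{' :: kv.1 ++ ['}'], kv.2) ∈ pvPairsB := by decide
theorem pvBridge2 : ∀ kv ∈ pvPairsB, pvLookup pvAltTable (pvBody kv.1) = some kv.2 := by decide

-- in any string the brace-free prefix before the first '}' is unique
theorem pvBraceUniq : ∀ (q p₁ p₂ : List Char), '}' ∉ p₁ → '}' ∉ p₂ →
    p₁ ++ ['}'] <+: q → p₂ ++ ['}'] <+: q → p₁ = p₂ := by
  intro q
  induction q with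
  | nil =>
    intro p₁ p₂ _ _ h₁ _
    have := h₁.length_le
    simp at this
  | cons c q ih =>
    intro p₁ p₂ n₁ n₂ h₁ h₂
    cases p₁ with
    | nil =>
      simp only [List.nil_append, List.cons_prefix_cons] at h₁
      cases p₂ with
      | nil => rfl
      | cons b t₂ =>
        simp only [List.cons_append, List.cons_prefix_cons] at h₂
        have hb : b = '}' := h₂.1.trans h₁.1.symm
        subst hb
        exact absurd (by simp) n₂
    | cons a t₁ =>
      simp only [List.cons_append, List.cons_prefix_cons] at h₁
      cases p₂ with
      | nil =>
        simp only [List.nil_append, List.cons_prefix_cons] at h₂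
        have ha : a = '}' := h₁.1.trans h₂.1.symm
        subst ha
        exact absurd (by simp) n₁
      | cons b t₂ =>
        simp only [List.cons_append, List.cons_prefix_cons] at h₂
        have := ih t₁ t₂ (by simp_all) (by simp_all) h₁.2 h₂.2
        rw [this, h₁.1, h₂.1]

-- a key is never a prefix of a different key followed by anything
theorem pvKeyNotPrefix {k k' : List Char} (hk : pvGood k) (hk' : pvGood k')
    (hne : k ≠ k') (r : List Char) : ¬ k <+: k' ++ r := by
  intro h
  apply hne
  rw [hk.1, hk'.1] at h
  rw [List.cons_append, List.cons_prefix_cons] at h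
  have h1 : pvBody k ++ ['}'] <+: (pvBody k' ++ ['}']) ++ r := h.2
  have h2 : pvBody k' ++ ['}'] <+: (pvBody k' ++ ['}']) ++ r := List.prefix_append _ _
  have := pvBraceUniq _ _ _ hk.2.2 hk'.2.2 h1 h2
  rw [hk.1, hk'.1, this]

-- stepping a replace over a non-'{' character
theorem pvRep_cons_ne {k : List Char} (v : List Char) (hk : pvGood k) {c : Char}
    (hc : c ≠ '{') (t : List Char) : pvRep k v (c :: t) = c :: pvRep k v t := by
  apply pvRep_neg
  intro h
  rw [hk.1] at h
  simp only [List.cons_prefix_cons] at h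
  exact hc h.1.symm

-- stepping a replace over a '{'-free block
theorem pvRep_append_nobrace {k : List Char} (v : List Char) (hk : pvGood k)
    {l : List Char} (hl : '{' ∉ l) (r : List Char) :
    pvRep k v (l ++ r) = l ++ pvRep k v r := by
  induction l with
  | nil => simp
  | cons c l ih =>
    have hc : c ≠ '{' := fun hcc => hl (by simp [hcc])
    have hl' : '{' ∉ l := fun hm => hl (List.mem_cons_of_mem _ hm)
    rw [List.cons_append, pvRep_cons_ne v hk hc (l ++ r), ih hl', List.cons_append]

-- a replace for one key walks over a different key unchanged
theorem pvRep_skip {k k' : List Char} (v : List Char) (hk : pvGood k) (hk' : pvGood k')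
    (hne : k ≠ k') (r : List Char) : pvRep k v (k' ++ r) = k' ++ pvRep k v r := by
  conv_lhs => rw [hk'.1, List.cons_append]
  rw [pvRep_neg k v (by rw [← List.cons_append, ← hk'.1]; exact pvKeyNotPrefix hk hk' hne r)]
  rw [List.append_assoc, pvRep_append_nobrace v hk hk'.2.1, List.singleton_append,
    pvRep_cons_ne v hk (by decide) r]
  conv_rhs => rw [hk'.1]
  simp

-- replacing with a value that is brace-free and no infix of d cannot create a 'd-suffix ++ }' prefix
theorem pvRep_no_create {k v d : List Char} (hv : '}' ∉ v) (hvd : ¬ v <:+: d) :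
    ∀ (m : Nat) (s : List Char), s.length ≤ m → ∀ d', d' <:+ d →
      ¬ (d' ++ ['}']) <+: s → ¬ (d' ++ ['}']) <+: pvRep k v s := by
  intro m
  induction m with
  | zero =>
    intro s hm d' _ _ hp
    have hs0 : s = [] := by cases s <;> simp_all
    subst hs0
    rw [pvRep_nil] at hp
    have := hp.length_le
    simp at this
  | succ m ih =>
    intro s hm d' hd' hs hp
    cases s with
    | nil =>
      rw [pvRep_nil] at hp
      have := hp.length_le
      simp at this
    | cons c t =>
      by_cases hpre : k <+: c :: t
      · rw [pvRep_pos k v hpre] at hp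
        by_cases hlen : v.length ≤ d'.length
        · have hvp : v <+: d' ++ ['}'] :=
            List.prefix_of_prefix_length_le (List.prefix_append v _) hp (by simp; omega)
          have hvd' : v <+: d' :=
            List.prefix_of_prefix_length_le hvp (List.prefix_append d' _) hlen
          exact hvd (hvd'.isInfix.trans hd'.isInfix)
        · have hin : d' ++ ['}'] <+: v :=
            List.prefix_of_prefix_length_le hp (List.prefix_append v _) (by simp at hlen ⊢; omega)
          exact hv (hin.subset (by simp))
      · rw [pvRep_neg k v hpre] at hp
        cases d' with
        | nil =>
          simp only [List.nil_append, List.cons_prefix_cons] at hp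
          exact hs (by simp [← hp.1])
        | cons e d₂ =>
          simp only [List.cons_append, List.cons_prefix_cons] at hp
          refine ih t (by simp at hm; omega) d₂ ((List.suffix_cons e d₂).trans hd') ?_ hp.2
          intro hq
          exact hs (by rw [List.cons_append, hp.1]; exact List.cons_prefix_cons.mpr ⟨rfl, hq⟩)

-- A's loop at the character-list level
def pvCascade (ps : List (List Char × List Char)) (s : List Char) : List Char :=
  ps.foldl (fun acc kv => pvRep kv.1 kv.2 acc) s

theorem pvCascade_nil (ps : List (List Char × List Char)) : pvCascade ps [] = [] := by
  induction ps with
  | nil => rfl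
  | cons kv ps ih => simp [pvCascade, List.foldl_cons, pvRep_nil] at ih ⊢; exact ih

theorem pvCascade_cons_ne (ps : List (List Char × List Char))
    (hg : ∀ kv ∈ ps, pvGood kv.1) {c : Char} (hc : c ≠ '{') (t : List Char) :
    pvCascade ps (c :: t) = c :: pvCascade ps t := by
  induction ps generalizing t with
  | nil => rfl
  | cons kv ps ih =>
    simp only [pvCascade, List.foldl_cons]
    rw [pvRep_cons_ne kv.2 (hg kv (by simp)) hc t]
    exact ih (fun kv' h => hg kv' (by simp [h])) _

theorem pvCascade_append_nobrace (ps : List (List Char × List Char))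
    (hg : ∀ kv ∈ ps, pvGood kv.1) {l : List Char} (hl : '{' ∉ l) (r : List Char) :
    pvCascade ps (l ++ r) = l ++ pvCascade ps r := by
  induction ps generalizing r with
  | nil => rfl
  | cons kv ps ih =>
    simp only [pvCascade, List.foldl_cons]
    rw [pvRep_append_nobrace kv.2 (hg kv (by simp)) hl r]
    exact ih (fun kv' h => hg kv' (by simp [h])) _

-- the cascade at a key occurrence: exactly that key fires
theorem pvCascade_key (ps : List (List Char × List Char))
    (hg : ∀ kv ∈ ps, pvGood kv.1) (hnd : (ps.map Prod.fst).Nodup)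
    (hvb : ∀ kv ∈ ps, '{' ∉ kv.2) {k v : List Char} (hmem : (k, v) ∈ ps) (r : List Char) :
    pvCascade ps (k ++ r) = v ++ pvCascade ps r := by
  induction ps generalizing r with
  | nil => simp at hmem
  | cons kv ps ih =>
    obtain ⟨k₀, v₀⟩ := kv
    simp only [pvCascade, List.foldl_cons]
    rcases List.mem_cons.mp hmem with heq | htl
    · obtain ⟨hk0, hv0⟩ := Prod.mk.injEq .. ▸ heq
      subst hk0; subst hv0
      have hgk : pvGood k := hg (k, v) (by simp)
      have h1 : k ++ r = '{' :: ((pvBody k ++ ['}']) ++ r) := by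
        conv_lhs => rw [hgk.1]
        rw [List.cons_append]
      have hstep : pvRep k v (k ++ r) = v ++ pvRep k v r := by
        rw [h1, pvRep_pos k v (by rw [← h1]; exact List.prefix_append k r)]
        congr 1
        have hlen : k.length - 1 = (pvBody k ++ ['}']).length := by
          conv_lhs => rw [hgk.1]
          simp
        rw [hlen, List.drop_left]
      rw [hstep]
      exact pvCascade_append_nobrace ps (fun kv' h => hg kv' (by simp [h]))
        (hvb (k, v) (by simp)) _
    · have hne : k₀ ≠ k := by
        intro hkk
        subst hkk
        exact (List.nodup_cons.mp hnd).1 (List.mem_map.mpr ⟨(k₀, v), htl, rfl⟩)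
      rw [pvRep_skip v₀ (hg (k₀, v₀) (by simp)) (hg (k, v) (by simp [htl])) hne r]
      exact ih (fun kv' h => hg kv' (by simp [h])) (List.nodup_cons.mp hnd).2
        (fun kv' h => hvb kv' (by simp [h])) htl _

-- the cascade when no key occurs at a '{': the '{' survives
theorem pvCascade_nokey (ps : List (List Char × List Char))
    (hg : ∀ kv ∈ ps, pvGood kv.1) (hv3 : ∀ kv ∈ ps, '}' ∉ kv.2)
    (hcross : ∀ kv ∈ ps, ∀ kv' ∈ ps, ¬ kv.2 <:+: pvBody kv'.1) (X : List Char)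
    (hX : ∀ kv ∈ ps, ¬ (pvBody kv.1 ++ ['}']) <+: X) :
    pvCascade ps ('{' :: X) = '{' :: pvCascade ps X := by
  induction ps generalizing X with
  | nil => rfl
  | cons kv ps ih =>
    obtain ⟨k, v⟩ := kv
    have hgk : pvGood k := hg (k, v) (by simp)
    simp only [pvCascade, List.foldl_cons]
    rw [pvRep_neg k v (by
      intro hp
      rw [hgk.1] at hp
      exact hX (k, v) (by simp) (List.cons_prefix_cons.mp hp).2)]
    exact ih (fun kv' h => hg kv' (by simp [h])) (fun kv' h => hv3 kv' (by simp [h]))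
      (fun kv' h kv'' h' => hcross kv' (by simp [h]) kv'' (by simp [h'])) _
      (fun kv' h' => pvRep_no_create (hv3 (k, v) (by simp))
        (hcross (k, v) (by simp) kv' (by simp [h'])) X.length X le_rfl (pvBody kv'.1)
        List.suffix_rfl (hX kv' (by simp [h'])))

-- the scanner's helpers
theorem pvSplitBrace_complete (w r : List Char) (hw : '}' ∉ w) :
    pvSplitBrace (w ++ '}' :: r) = some (w, r) := by
  induction w with
  | nil => simp [pvSplitBrace]
  | cons c w ih =>
    have hc : ¬ c = '}' := fun hcc => hw (by simp [hcc])
    rw [List.cons_append]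
    simp only [pvSplitBrace, if_neg hc, ih (fun hm => hw (List.mem_cons_of_mem _ hm))]

theorem pvLookup_some_mem (ps : List (List Char × List Char)) (tok v : List Char)
    (h : pvLookup ps tok = some v) : (tok, v) ∈ ps := by
  induction ps with
  | nil => simp [pvLookup] at h
  | cons kv ps ih =>
    obtain ⟨k₀, v₀⟩ := kv
    by_cases htk : tok = k₀
    · simp only [pvLookup, if_pos htk] at h
      simp [htk, Option.some.inj h]
    · simp only [pvLookup, if_neg htk] at h
      exact List.mem_cons_of_mem _ (ih h)

-- main: A's cascade of replaces and B's single scan agree on every string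
theorem pvMain : ∀ (m : Nat) (s : List Char), s.length ≤ m →
    pvCascade pvPairsB s = pvScan s := by
  intro m
  induction m with
  | zero =>
    intro s hm
    have hs0 : s = [] := by cases s <;> simp_all
    subst hs0
    rw [pvCascade_nil, pvScan]
  | succ m ih =>
    intro s hm
    cases s with
    | nil => rw [pvCascade_nil, pvScan]
    | cons c t =>
      have htm : t.length ≤ m := by simp at hm; omega
      by_cases hc : c = '{'
      · subst hc
        by_cases hk : ∃ kv ∈ pvPairsB, kv.1 <+: '{' :: t
        · obtain ⟨⟨k, v⟩, hmem, hpre⟩ := hk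
          have hgk : pvGood k := pvSide1 (k, v) hmem
          obtain ⟨b, hbk, hbNoBrace, hbBody⟩ :
              ∃ b, k = '{' :: (b ++ ['}']) ∧ '}' ∉ b ∧ b = pvBody k :=
            ⟨pvBody k, hgk.1, hgk.2.2, rfl⟩
          have hpre' : b ++ ['}'] <+: t := by
            rw [hbk] at hpre
            exact (List.cons_prefix_cons.mp hpre).2
          obtain ⟨r, hr⟩ := hpre'
          have ht : t = b ++ '}' :: r := by rw [← hr]; simp
          have hsb : pvSplitBrace t = some (b, r) := by
            rw [ht]; exact pvSplitBrace_complete _ _ hbNoBrace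
          have hlk : pvLookup pvAltTable b = some v := by
            rw [hbBody]
            exact pvBridge2 (k, v) hmem
          have hsplit : ('{' :: t : List Char) = k ++ r := by rw [ht, hbk]; simp
          have hrlen : r.length ≤ m := by
            have : t.length = b.length + 1 + r.length := by rw [ht]; simp; omega
            omega
          have hscan : pvScan ('{' :: t) = v ++ pvScan r := by
            rw [pvScan.eq_def]
            simp only []
            rw [if_true]
            split
            · rename_i w' r' hsome
              rw [hsb] at hsome
              obtain ⟨hw, hr'⟩ := Prod.mk.injEq .. ▸ Option.some.inj hsome
              subst hw; subst hr'
              simp only [hlk]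
            · rename_i hnone
              rw [hnone] at hsb
              cases hsb
          rw [hscan, hsplit, pvCascade_key pvPairsB pvSide1 pvSide2
            (fun kv h => (pvSide3 kv h).1) hmem r, ih r hrlen]
        · push Not at hk
          have hX : ∀ kv ∈ pvPairsB, ¬ (pvBody kv.1 ++ ['}']) <+: t := by
            intro kv h hp
            apply hk kv h
            rw [(pvSide1 kv h).1]
            exact List.cons_prefix_cons.mpr ⟨rfl, hp⟩
          have hscan : pvScan ('{' :: t) = '{' :: pvScan t := by
            rw [pvScan.eq_def]
            simp only []
            rw [if_true]
            split
            · rename_i w' r' hsome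
              have hspec := pvSplitBrace_some hsome
              have hlk : pvLookup pvAltTable w' = none := by
                cases hl : pvLookup pvAltTable w' with
                | none => rfl
                | some v =>
                  exfalso
                  have hm' := pvBridge1 (w', v) (pvLookup_some_mem _ _ _ hl)
                  apply hk _ hm'
                  refine List.cons_prefix_cons.mpr ⟨rfl, ?_⟩
                  rw [hspec.1]
                  exact ⟨r', by simp⟩
              simp only [hlk]
            · rfl
          rw [hscan, pvCascade_nokey pvPairsB pvSide1 (fun kv h => (pvSide3 kv h).2)
            pvSide4 t hX, ih t htm]
      · rw [pvCascade_cons_ne pvPairsB pvSide1 hc t, ih t htm, pvScan]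
        simp [hc]

-- A's string-level fold maps to the character-list fold
theorem pvFoldA (psS : List (String × String)) (s : String) :
    (psS.foldl (fun concrete kv => PySem.Str.replace concrete kv.1 kv.2) s).toList
      = (psS.map (fun kv => (kv.1.toList, kv.2.toList))).foldl
          (fun l kv => PySem.Chars.replace l kv.1 kv.2) s.toList := by
  induction psS generalizing s with
  | nil => rfl
  | cons kv ps ih =>
    simp only [List.foldl_cons, List.map_cons]
    rw [ih, PySem.Str.toList_replace]

-- the character-list fold is pvCascade (all keys are nonempty)
theorem pvFoldRep (ps : List (List Char × List Char)) (hne : ∀ kv ∈ ps, kv.1 ≠ [])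
    (l : List Char) :
    ps.foldl (fun acc kv => PySem.Chars.replace acc kv.1 kv.2) l = pvCascade ps l := by
  induction ps generalizing l with
  | nil => rfl
  | cons kv ps ih =>
    simp only [pvCascade, List.foldl_cons]
    rw [pvReplace_eq_rep kv.2 (hne kv (by simp)) l]
    exact ih (fun kv' h => hne kv' (by simp [h])) _

-- ===== VERDICT (by name: the statement is the Claim_ definition above) =====
theorem concrete_v2_path_py_spec : Claim_equal_concrete_v2_path_py := by
  intro path _
  unfold Spec_concrete_v2_path_py concrete_v2_path_py concrete_v2_path_py_alt
  apply String.ext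
  rw [String.toList_ofList, pvFoldA]
  rw [show (pvPairsA.map (fun kv => (kv.1.toList, kv.2.toList))) = pvPairsB from rfl]
  rw [pvFoldRep pvPairsB (fun kv h => by rw [(pvSide1 kv h).1]; simp) path.toList]
  exact pvMain path.toList.length path.toList le_rfl
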